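-- pv_equiv track=rewrite | github.com/jan-bogaerts/pygate | pyGate/MBus/binConverter.py | _int_decode
-- ===== SOURCE A (Python) =====
-- def _int_decode(data, size):
--     """"decode data into int"""
--     if not data or size < 1:
--         return None
--     result = 0
--     neg = data[size -1] & 0x80
--     for i in range(size, 0, -1):
--         if neg:
--             result = (result << 8) + (data[i-1] ^ 0xFF)
--         else:
--             result = (result << 8) + data[i - 1]
--     if neg:
--         result = result * -1 -1
--     return result
-- ===== SOURCE B (Python) =====
-- def _int_decode(data, size):
--     """decode data into int"""
--     if not data or size < 1:
--         return None
--     if data[size - 1] & 0x80: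
--         return -1 - sum((b ^ 0xFF) << (8 * i) for i, b in enumerate(data[:size]))
--     return sum(b << (8 * i) for i, b in enumerate(data[:size]))
-- ===== Notes on version B (the rewrite author's own statement) =====
-- stated objective: simpler
-- what changed: Replaces the backwards Horner loop (shift-accumulate from the high byte down, with the sign branch inside the loop) by a single forward positional sum over enumerate(data[:size]) with closed-form weights b << (8*i), and moves the negative-case correction out as 'return -1 - sum(...)'.
import Mathlib
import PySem

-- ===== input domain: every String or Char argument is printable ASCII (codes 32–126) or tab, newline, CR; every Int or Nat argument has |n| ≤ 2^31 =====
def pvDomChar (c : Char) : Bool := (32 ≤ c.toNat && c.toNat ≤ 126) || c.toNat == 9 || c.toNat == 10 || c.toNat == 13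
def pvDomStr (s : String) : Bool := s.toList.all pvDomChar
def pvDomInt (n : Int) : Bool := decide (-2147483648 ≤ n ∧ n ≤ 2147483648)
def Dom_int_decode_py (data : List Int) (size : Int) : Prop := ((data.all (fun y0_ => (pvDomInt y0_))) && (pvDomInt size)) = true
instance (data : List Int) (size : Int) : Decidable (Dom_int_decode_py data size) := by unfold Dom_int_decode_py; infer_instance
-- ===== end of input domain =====

-- B replaces A's backwards shift-accumulate (Horner) loop with one forward positional
-- sum over enumerate(data[:size]) with closed-form weights b << (8*i); objective: simpler.

-- ===== PORT A =====
def int_decode_py (data : List Int) (size : Int) : Option Int :=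
  if data = [] ∨ size < 1 then none
  else
    let neg := PySem.Int.band (PySem.List.pyGetD data (size - 1) 0) 0x80
    let result := (PySem.List.pyRange size 0 (-1)).foldl
      (fun (result : Int) (i : Int) =>
        if neg ≠ 0 then (result <<< (8:Nat)) + PySem.Int.bxor (PySem.List.pyGetD data (i - 1) 0) 0xFF
        else (result <<< (8:Nat)) + PySem.List.pyGetD data (i - 1) 0) (0:Int)
    some (if neg ≠ 0 then result * (-1) - 1 else result)

-- ===== PORT B =====
def int_decode_py_alt (data : List Int) (size : Int) : Option Int :=
  if data = [] ∨ size < 1 then none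
  else
    let pre := PySem.List.slice data none (some size)
    if PySem.Int.band (PySem.List.pyGetD data (size - 1) 0) 0x80 ≠ 0 then
      some (-1 - ((PySem.List.enumerate pre).map
        (fun p => PySem.Int.bxor p.2 0xFF <<< (((8 * p.1).toNat : Nat) : Int))).sum)
    else
      some (((PySem.List.enumerate pre).map (fun p => p.2 <<< (((8 * p.1).toNat : Nat) : Int))).sum)

-- ===== PRECONDITION & SPEC =====
-- Pre_ excludes only the inputs on which Python A raises IndexError
-- (data nonempty, 1 ≤ size, but size > len(data)); everywhere else A returns normally.
def Pre_int_decode_py (data : List Int) (size : Int) : Prop :=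
  data = [] ∨ size < 1 ∨ size ≤ (data.length : Int)
instance (data : List Int) (size : Int) : Decidable (Pre_int_decode_py data size) := by
  unfold Pre_int_decode_py; infer_instance

def pvWitness_int_decode_py : List Int × Int := ([1, 128], 2)

def Spec_int_decode_py (data : List Int) (size : Int) (out : Option Int) : Prop := out = int_decode_py_alt data size
instance (data : List Int) (size : Int) (out : Option Int) : Decidable (Spec_int_decode_py data size out) := by unfold Spec_int_decode_py; infer_instance

-- ===== CLAIM (what is proved, stated in full; the proofs are below) =====
def Claim_equal_int_decode_py : Prop := ∀ (data : List Int) (size : Int), Dom_int_decode_py data size → Pre_int_decode_py data size → Spec_int_decode_py data size (int_decode_py data size)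

-- ===== LEMMAS AND PROOFS =====

-- the common positional sum both programs compute: Σ_{j<n} f(data[j]) * 256^j
def posSum (f : Int → Int) (data : List Int) (n : Nat) : Int :=
  ((List.range n).map (fun (j : Nat) => f (PySem.List.pyGetD data (j : Int) 0) * ((256:Int) ^ j))).sum

-- A's countdown Horner loop computes the positional sum
theorem hornerA (f : Int → Int) (data : List Int) :
    ∀ (n : Nat) (a : Int),
      (PySem.List.pyRange (n : Int) 0 (-1)).foldl
        (fun (r : Int) (i : Int) => (r <<< (8:Nat)) + f (PySem.List.pyGetD data (i - 1) 0)) a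
      = a * 256 ^ n + posSum f data n := by
  intro n
  induction n with
  | zero =>
    intro a
    simp [PySem.List.pyRange_neg_one_eq_nil (by omega : (0:Int) ≤ 0), posSum]
  | succ m ih =>
    intro a
    rw [show ((m + 1 : Nat) : Int) = (m : Int) + 1 by push_cast; ring,
      PySem.List.pyRange_neg_one_cons (by omega : (0:Int) < (m : Int) + 1)]
    have h1 : (m : Int) + 1 - 1 = (m : Int) := by ring
    simp only [List.foldl_cons, h1, ih]
    rw [Int.shiftLeft_eq]
    simp only [posSum, List.range_succ, List.map_append, List.sum_append,
      List.map_cons, List.map_nil, List.sum_cons, List.sum_nil]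
    norm_num
    ring

-- B's enumerate sum with shift weights equals the positional sum, start generalized
theorem sumB (g : Int → Int) :
    ∀ (l : List Int) (s : Nat),
      ((PySem.List.enumerate l ((s : Nat) : Int)).map
        (fun p => g p.2 <<< (((8 * p.1).toNat : Nat) : Int))).sum
      = ((List.range l.length).map
        (fun (j : Nat) => g (l.getD j 0) * ((256:Int) ^ (s + j)))).sum := by
  intro l
  induction l with
  | nil => intro s; simp [PySem.List.enumerate]
  | cons x xs ih =>
    intro s
    rw [PySem.List.enumerate_cons,
      show ((s : Int) + 1) = ((s + 1 : Nat) : Int) by push_cast; ring]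
    have hsh : g x <<< (((8 * ((s : Nat) : Int)).toNat : Nat) : Int) = g x * (256:Int) ^ s := by
      rw [show (8 * ((s : Nat) : Int)) = ((8 * s : Nat) : Int) by push_cast; ring,
        Int.toNat_natCast, Int.shiftLeft_natCast_right, Int.shiftLeft_eq, pow_mul]
      norm_num
    rw [List.map_cons, List.sum_cons, ih (s + 1),
      List.length_cons, List.range_succ_eq_map, List.map_cons, List.sum_cons, List.map_map]
    simp only [List.getD_cons_zero, Nat.add_zero]
    rw [hsh]
    congr 1
    apply congrArg List.sum
    apply List.map_congr_left
    intro j _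
    simp only [Function.comp_apply, Nat.succ_eq_add_one, List.getD_cons_succ]
    rw [show s + 1 + j = s + (j + 1) by omega]

-- bridge: B's sum over the first n elements is the positional sum
theorem bridgeB (g : Int → Int) (data : List Int) (n : Nat) (hn : n ≤ data.length) :
    ((PySem.List.enumerate (List.take n data)).map
      (fun p => g p.2 <<< (((8 * p.1).toNat : Nat) : Int))).sum = posSum g data n := by
  have h0 : PySem.List.enumerate (List.take n data)
      = PySem.List.enumerate (List.take n data) (((0 : Nat) : Nat) : Int) := by norm_num
  rw [h0, sumB g (List.take n data) 0, posSum]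
  have hlen : (List.take n data).length = n := by
    rw [List.length_take]; omega
  rw [hlen]
  apply congrArg List.sum
  apply List.map_congr_left
  intro j hj
  have hjn : j < n := List.mem_range.mp hj
  have h1 : (List.take n data).getD j 0 = data.getD j 0 := by
    simp only [List.getD, List.getElem?_take, if_pos hjn]
  rw [h1, PySem.List.pyGetD_natCast, Nat.zero_add]

-- ===== VERDICT (by name: the statement is the Claim_ definition above) =====
theorem int_decode_py_spec : Claim_equal_int_decode_py := by
  intro data size hdom hpre
  unfold Spec_int_decode_py int_decode_py int_decode_py_alt
  by_cases hg : data = [] ∨ size < 1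
  · simp [hg]
  · push_neg at hg
    obtain ⟨hne, hsz⟩ := hg
    have hlen : size ≤ (data.length : Int) := by
      rcases hpre with h | h | h
      · exact absurd h hne
      · omega
      · exact h
    rw [if_neg (by push_neg; exact ⟨hne, hsz⟩), if_neg (by push_neg; exact ⟨hne, hsz⟩)]
    lift size to Nat using (by omega) with n
    have hnlen : n ≤ data.length := by exact_mod_cast hlen
    simp only [PySem.List.slice_to_natCast]
    by_cases hneg :
        PySem.Int.band (PySem.List.pyGetD data ((n : Int) - 1) 0) 0x80 ≠ 0
    · simp only [if_pos hneg]
      rw [hornerA (fun x => PySem.Int.bxor x 0xFF) data n 0,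
        bridgeB (fun x => PySem.Int.bxor x 0xFF) data n hnlen]
      congr 1
      ring
    · simp only [if_neg hneg]
      rw [hornerA (fun x => x) data n 0, bridgeB (fun x => x) data n hnlen]
      congr 1
      ring
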